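-- pv_equiv track=rewrite | github.com/MinaPecheux/Advent-Of-Code | 2015/Python/day5.py | is_nice_p1
-- ===== SOURCE A (Python) =====
-- VOWELS = 'aeiou'
--
-- def is_nice_p1(str):
--     '''Checks if the string is nice, given the criteria:
--         - contains at least three vowels
--         - at least one letter appears twice in a row
--         - does NOT contain the strings: ab, cd, pq, xy (supersedes other
--         requirements)
--
--     :param str: String to check.
--     :type str: str
--     :return: "Niceness" of the string.
--     :rtype: bool
--     '''
--     # check for forbidden substrings
--     if 'ab' in str or 'cd' in str or 'pq' in str or 'xy' in str:
--         return False
--     # check for number of vowels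
--     vowels_count = sum([ 1 if char in VOWELS else 0 for char in str ])
--     if vowels_count < 3:
--         return False
--     # check for repeated letter
--     for i in range(1, len(str)):
--         if str[i-1] == str[i]:
--             return True
--     return False
-- ===== SOURCE B (Python) =====
-- VOWELS = 'aeiou'
--
-- def is_nice_p1(str):
--     '''Same niceness check, computed in one fused pass over adjacent pairs
--     instead of three separate scans.'''
--     if not str:
--         return False
--     forbidden = False
--     has_repeat = False
--     vowels = 1 if str[0] in VOWELS else 0
--     for i in range(1, len(str)):
--         if str[i - 1:i + 1] in ('ab', 'cd', 'pq', 'xy'):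
--             forbidden = True
--         if str[i - 1] == str[i]:
--             has_repeat = True
--         if str[i] in VOWELS:
--             vowels += 1
--     return (not forbidden) and vowels >= 3 and has_repeat
-- ===== Notes on version B (the rewrite author's own statement) =====
-- stated objective: alternative
-- what changed: A makes three separate scans (four substring 'in' tests, a vowel-count sum over a list comprehension, then an index loop looking for a doubled letter); B is one fused pass over adjacent character pairs maintaining a vowel counter and two flags.
import Mathlib
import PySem

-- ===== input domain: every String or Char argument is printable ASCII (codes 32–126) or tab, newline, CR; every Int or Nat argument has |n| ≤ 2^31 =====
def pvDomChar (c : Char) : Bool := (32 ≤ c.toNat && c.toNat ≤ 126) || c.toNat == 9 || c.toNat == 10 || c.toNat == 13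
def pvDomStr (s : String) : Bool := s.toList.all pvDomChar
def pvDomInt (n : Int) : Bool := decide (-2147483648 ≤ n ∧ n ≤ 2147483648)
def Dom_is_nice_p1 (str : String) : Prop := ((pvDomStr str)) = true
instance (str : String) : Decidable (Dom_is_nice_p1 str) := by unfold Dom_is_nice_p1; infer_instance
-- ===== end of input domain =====

-- B replaces A's three separate scans (substring tests, a vowel-count pass, an index loop
-- for a doubled letter) by ONE fused pass over adjacent character pairs; objective: simpler/alternative.

-- ===== PORT A =====
def pvVOWELS : String := "aeiou"

-- A's repeat loop: 'for i in range(1, len(str)): if str[i-1] == str[i]: return True' / 'return False'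
def pvRepLoop (s : List Char) : List Int → Bool
  | [] => false
  | i :: rest =>
      if PySem.List.pyGet? s (i - 1) == PySem.List.pyGet? s i then true
      else pvRepLoop s rest

def is_nice_p1 (str : String) : Bool :=
  if PySem.Str.isIn "ab" str || PySem.Str.isIn "cd" str ||
     PySem.Str.isIn "pq" str || PySem.Str.isIn "xy" str then
    false
  else
    let vowels_count : Int :=
      (str.toList.map (fun char => if pvVOWELS.toList.contains char then (1 : Int) else 0)).sum
    if vowels_count < 3 then false
    else pvRepLoop str.toList (PySem.List.pyRange 1 (PySem.Str.len str))

-- ===== PORT B =====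
def pvIsVowel (c : Char) : Bool := pvVOWELS.toList.contains c

-- Source B's tuple ('ab','cd','pq','xy') of two-character strings, held as character pairs
-- (str[i-1:i+1] with 1 ≤ i < len is exactly the pair (str[i-1], str[i])).
def pvBadPairs : List (Char × Char) := [('a', 'b'), ('c', 'd'), ('p', 'q'), ('x', 'y')]

-- Source B's single loop: state (vowels, has_repeat, forbidden), prev = str[i-1], c = str[i]
def pvFused (prev : Char) (rest : List Char) (vowels : Nat) (hasRepeat forbidden : Bool) :
    Nat × Bool × Bool :=
  match rest with
  | [] => (vowels, hasRepeat, forbidden)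
  | c :: t =>
      pvFused c t (if pvIsVowel c then vowels + 1 else vowels)
        (hasRepeat || (prev == c))
        (forbidden || pvBadPairs.contains (prev, c))

def is_nice_p1_alt (str : String) : Bool :=
  match str.toList with
  | [] => false
  | c :: rest =>
      let r := pvFused c rest (if pvIsVowel c then 1 else 0) false false
      !r.2.2 && decide (3 ≤ r.1) && r.2.1

-- ===== PRECONDITION & SPEC =====
def Spec_is_nice_p1 (str : String) (out : Bool) : Prop := out = is_nice_p1_alt str
instance (str : String) (out : Bool) : Decidable (Spec_is_nice_p1 str out) := by unfold Spec_is_nice_p1; infer_instance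

-- ===== CLAIM (what is proved, stated in full; the proofs are below) =====
def Claim_equal_is_nice_p1 : Prop := ∀ (str : String), Dom_is_nice_p1 str → Spec_is_nice_p1 str (is_nice_p1 str)

-- ===== LEMMAS AND PROOFS =====

-- the fused loop computes: total vowels, any adjacent equal pair, any adjacent forbidden pair
theorem pvFused_spec (rest : List Char) (prev : Char) (v : Nat) (r f : Bool) :
    pvFused prev rest v r f =
      (v + rest.countP pvIsVowel,
       r || (((prev :: rest).zip rest).any fun p => p.1 == p.2),
       f || (((prev :: rest).zip rest).any fun p => pvBadPairs.contains p)) := by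
  induction rest generalizing prev v r f with
  | nil => simp [pvFused]
  | cons c t ih =>
      rw [pvFused, ih]
      refine Prod.ext ?_ (Prod.ext ?_ ?_) <;>
        simp [List.countP_cons, Bool.or_assoc] <;> split_ifs <;> omega

-- a two-character string is a substring iff the pair occurs adjacently
theorem pvInfix_pair (l : List Char) (a b : Char) :
    ([a, b] <:+: l) ↔ (a, b) ∈ l.zip l.tail := by
  induction l with
  | nil => simp
  | cons x xs ih =>
      cases xs with
      | nil =>
          simp [List.infix_cons_iff, List.cons_prefix_cons]
      | cons y ys =>
          rw [List.infix_cons_iff, ih]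
          simp [List.cons_prefix_cons]

-- A's early-return loop is List.any over the visited indices
theorem pvRepLoop_eq_any (s : List Char) (is : List Int) :
    pvRepLoop s is = is.any fun i => PySem.List.pyGet? s (i - 1) == PySem.List.pyGet? s i := by
  induction is with
  | nil => rfl
  | cons i rest ih => rw [pvRepLoop]; split <;> simp_all

-- the index form of A's repeat test equals the pair form used by B
theorem pvRep_range_eq_zip (l : List Char) :
    ((PySem.List.pyRange 1 (l.length : Int)).any fun i =>
        PySem.List.pyGet? l (i - 1) == PySem.List.pyGet? l i) =
      ((l.zip l.tail).any fun p => p.1 == p.2) := by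
  apply Bool.eq_iff_iff.mpr
  simp only [List.any_eq_true, PySem.List.mem_pyRange_one, beq_iff_eq]
  constructor
  · rintro ⟨i, ⟨h1, h2⟩, heq⟩
    obtain ⟨j, rfl⟩ : ∃ j : Nat, i = (j : Int) + 1 := ⟨(i - 1).toNat, by omega⟩
    have hj1 : (j : Int) + 1 - 1 = (j : Int) := by ring
    have hj2 : (j : Int) + 1 = ((j + 1 : Nat) : Int) := by push_cast; ring
    rw [hj1, hj2, PySem.List.pyGet?_natCast, PySem.List.pyGet?_natCast] at heq
    have hjlt : j + 1 < l.length := by omega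
    refine ⟨(l[j], l[j + 1]), ?_, ?_⟩
    · rw [List.mem_iff_getElem]
      refine ⟨j, by simp [List.length_zip, List.length_tail]; omega, ?_⟩
      simp [List.getElem_zip, List.getElem_tail]
    · have := heq
      rw [List.getElem?_eq_getElem (by omega), List.getElem?_eq_getElem hjlt] at this
      simpa using this
  · rintro ⟨p, hp, heq⟩
    rw [List.mem_iff_getElem] at hp
    obtain ⟨j, hj, rfl⟩ := hp
    have hjl : j + 1 < l.length := by
      simp [List.length_zip, List.length_tail] at hj; omega
    refine ⟨(j : Int) + 1, ⟨by omega, by omega⟩, ?_⟩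
    have hj1 : (j : Int) + 1 - 1 = (j : Int) := by ring
    have hj2 : (j : Int) + 1 = ((j + 1 : Nat) : Int) := by push_cast; ring
    rw [hj1, hj2, PySem.List.pyGet?_natCast, PySem.List.pyGet?_natCast]
    simp [List.getElem_zip, List.getElem_tail] at heq ⊢
    rw [List.getElem?_eq_getElem (by omega), List.getElem?_eq_getElem hjl]
    simpa using heq

-- A's four substring tests are B's forbidden-pair scan
theorem pvForbidden_eq (s : String) :
    (PySem.Str.isIn "ab" s || PySem.Str.isIn "cd" s ||
     PySem.Str.isIn "pq" s || PySem.Str.isIn "xy" s) =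
      ((s.toList.zip s.toList.tail).any fun p => pvBadPairs.contains p) := by
  apply Bool.eq_iff_iff.mpr
  simp only [Bool.or_eq_true, PySem.Str.isIn_iff_infix, List.any_eq_true]
  have h := fun a b => pvInfix_pair s.toList a b
  constructor
  · rintro (((hab | hcd) | hpq) | hxy)
    · exact ⟨_, (h _ _).mp hab, by decide⟩
    · exact ⟨_, (h _ _).mp hcd, by decide⟩
    · exact ⟨_, (h _ _).mp hpq, by decide⟩
    · exact ⟨_, (h _ _).mp hxy, by decide⟩
  · rintro ⟨p, hp, hmem⟩
    have : p = ('a', 'b') ∨ p = ('c', 'd') ∨ p = ('p', 'q') ∨ p = ('x', 'y') := by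
      simpa [pvBadPairs] using hmem
    rcases this with rfl | rfl | rfl | rfl
    · exact Or.inl (Or.inl (Or.inl ((h _ _).mpr hp)))
    · exact Or.inl (Or.inl (Or.inr ((h _ _).mpr hp)))
    · exact Or.inl (Or.inr ((h _ _).mpr hp))
    · exact Or.inr ((h _ _).mpr hp)

-- assembling A's early-return chain into B's conjunction
theorem pvAssemble (F R : Bool) (N : Nat) :
    (if F = true then false
     else if ((N : Int) < 3) then false else R) = (!F && decide (3 ≤ N) && R) := by
  have hc : ((N : Int) < 3) ↔ ¬ 3 ≤ N := by push_cast; omega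
  cases F <;> by_cases h : 3 ≤ N <;> simp [hc, h]

-- ===== VERDICT (by name: the statement is the Claim_ definition above) =====
theorem is_nice_p1_spec : Claim_equal_is_nice_p1 := by
  intro s _
  unfold Spec_is_nice_p1 is_nice_p1
  rw [pvForbidden_eq, PySem.Str.len_eq, pvRepLoop_eq_any, pvRep_range_eq_zip,
      PySem.List.sum_map_ite_one_zero (fun c => pvVOWELS.toList.contains c)]
  simp only [pvAssemble]
  cases hl : s.toList with
  | nil => simp [is_nice_p1_alt, hl]
  | cons c rest =>
      simp only [is_nice_p1_alt, hl]
      rw [pvFused_spec]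
      have hpv : pvIsVowel = fun c => decide (c ∈ pvVOWELS.toList) := by
        funext c; simp [pvIsVowel]
      simp [pvIsVowel, hpv, List.countP_cons, Nat.add_comm]
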